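-- pv_equiv track=rewrite | github.com/Kisang-Kwon/Rosalind | bioinfor_strongholds/enumerating_oriented_gene_ordering.py | permute_sign
-- ===== SOURCE A (Python) =====
-- def permute_sign(max_permute_count: int, current_count: int):
--     current_count += 1
--     signs = [[1], [-1]]
--
--     if current_count == max_permute_count:
--         return signs
--
--     permuted_sequence = list()
--     child_sequences = permute_sign(max_permute_count, current_count)
--     for sign in signs:
--         for child_sequence in child_sequences:
--             permuted_sequence.append(sign + child_sequence[:])
--
--     return permuted_sequence
-- ===== SOURCE B (Python) =====
-- def permute_sign(max_permute_count: int, current_count: int):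
--     n = max_permute_count - current_count
--     return [[1 - 2 * ((i // 2 ** (n - 1 - j)) % 2) for j in range(n)]
--             for i in range(2 ** n)]
-- ===== Notes on version B (the rewrite author's own statement) =====
-- stated objective: alternative
-- what changed: Replaced A's self-recursion (which rebuilds the sign pair at every level and copies child rows) by a closed-form enumeration: row i of the 2**n rows is read off the base-2 digits of i, with no recursion and no list concatenation. (Where current_count >= max_permute_count A raises RecursionError and B raises too (TypeError/empty), so those inputs are outside Pre_.)
import Mathlib
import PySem

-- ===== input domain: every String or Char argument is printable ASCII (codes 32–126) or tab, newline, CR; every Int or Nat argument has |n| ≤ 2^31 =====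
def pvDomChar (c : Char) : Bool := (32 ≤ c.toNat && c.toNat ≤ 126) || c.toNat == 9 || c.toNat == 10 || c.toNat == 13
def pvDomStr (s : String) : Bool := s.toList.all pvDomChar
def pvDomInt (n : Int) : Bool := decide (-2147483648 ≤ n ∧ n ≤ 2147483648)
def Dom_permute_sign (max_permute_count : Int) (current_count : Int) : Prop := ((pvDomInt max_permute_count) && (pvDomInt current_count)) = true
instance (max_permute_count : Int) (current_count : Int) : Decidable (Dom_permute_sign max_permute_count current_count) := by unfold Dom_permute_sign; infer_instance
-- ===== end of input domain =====

-- B replaces A's self-recursion by a closed-form digit enumeration of the 2^n rows (objective: alternative).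

-- ===== PORT A =====
-- A recurses with current_count+1 until it equals max_permute_count; the recursion
-- terminates exactly when current_count < max_permute_count, so the port carries a
-- fuel of (max - current).toNat, which suffices on every terminating input
-- (inputs where the Python recursion diverges are excluded by Pre_).
def permuteSignFuel (fuel : Nat) (max_permute_count : Int) (current_count : Int) : List (List Int) :=
  match fuel with
  | 0 => []
  | fuel + 1 =>
    let current_count := current_count + 1
    let signs : List (List Int) := [[1], [-1]]
    if current_count = max_permute_count then signs
    else
      let child_sequences := permuteSignFuel fuel max_permute_count current_count
      signs.foldl (fun acc sign =>
        child_sequences.foldl (fun acc c => acc ++ [sign ++ c]) acc) []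

def permute_sign (max_permute_count : Int) (current_count : Int) : List (List Int) :=
  permuteSignFuel (max_permute_count - current_count).toNat max_permute_count current_count

-- ===== PORT B =====
-- For n < 0 the Python B raises TypeError (2 ** n is a float); those inputs are
-- outside Pre_, where .toNat clamps n to 0. On 0 ≤ n the indices i, j are
-- non-negative, so Nat division/mod coincide with Python's // and %.
def permute_sign_alt (max_permute_count : Int) (current_count : Int) : List (List Int) :=
  let n := (max_permute_count - current_count).toNat
  (List.range (2 ^ n)).map (fun i =>
    (List.range n).map (fun j => 1 - 2 * (((i / 2 ^ (n - 1 - j)) % 2 : Nat) : Int)))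

-- ===== PRECONDITION & SPEC =====
-- Pre_: A's recursion returns iff current_count < max_permute_count; on current_count >= max_permute_count
-- the Python A recurses forever and raises RecursionError, so those inputs are excluded.
def Pre_permute_sign (max_permute_count : Int) (current_count : Int) : Prop :=
  current_count < max_permute_count
instance (max_permute_count : Int) (current_count : Int) : Decidable (Pre_permute_sign max_permute_count current_count) := by unfold Pre_permute_sign; infer_instance

def pvWitness_permute_sign : Int × Int := (3, 0)

def Spec_permute_sign (max_permute_count : Int) (current_count : Int) (out : List (List Int)) : Prop := out = permute_sign_alt max_permute_count current_count
instance (max_permute_count : Int) (current_count : Int) (out : List (List Int)) : Decidable (Spec_permute_sign max_permute_count current_count out) := by unfold Spec_permute_sign; infer_instance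

-- ===== CLAIM (what is proved, stated in full; the proofs are below) =====
def Claim_equal_permute_sign : Prop := ∀ (max_permute_count : Int) (current_count : Int), Dom_permute_sign max_permute_count current_count → Pre_permute_sign max_permute_count current_count → Spec_permute_sign max_permute_count current_count (permute_sign max_permute_count current_count)

-- ===== LEMMAS AND PROOFS =====

-- row i of B's table, as a named function of the row length n
def gRow (n i : Nat) : List Int :=
  (List.range n).map (fun j => 1 - 2 * (((i / 2 ^ (n - 1 - j)) % 2 : Nat) : Int))

theorem gRow_lo (n i : Nat) (hi : i < 2 ^ n) : gRow (n + 1) i = 1 :: gRow n i := by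
  unfold gRow
  rw [List.range_succ_eq_map, List.map_cons, List.map_map]
  congr 1
  · simp [Nat.div_eq_of_lt hi]
  · refine List.map_congr_left (fun j hj => ?_)
    have he : n - (j + 1) = n - 1 - j := by omega
    simp [Function.comp, Nat.succ_eq_add_one, he]

theorem div_pow_mod_two (n i s : Nat) (hs : s + 1 ≤ n) :
    (2 ^ n + i) / 2 ^ s % 2 = i / 2 ^ s % 2 := by
  have h2 : 2 * 2 ^ (n - s - 1) = 2 ^ (n - s) := by
    rw [← pow_succ']
    congr 1
    omega
  have hpow : 2 ^ n = 2 ^ s * (2 * 2 ^ (n - s - 1)) := by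
    rw [h2, ← pow_add]
    congr 1
    omega
  calc (2 ^ n + i) / 2 ^ s % 2
      = (2 ^ s * (2 * 2 ^ (n - s - 1)) + i) / 2 ^ s % 2 := by rw [← hpow]
    _ = (2 * 2 ^ (n - s - 1) + i / 2 ^ s) % 2 := by
          rw [Nat.mul_add_div (by positivity)]
    _ = i / 2 ^ s % 2 := by rw [Nat.mul_add_mod]

theorem gRow_hi (n i : Nat) (hi : i < 2 ^ n) :
    gRow (n + 1) (2 ^ n + i) = -1 :: gRow n i := by
  unfold gRow
  rw [List.range_succ_eq_map, List.map_cons, List.map_map]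
  congr 1
  · have h0 : (2 ^ n + i) / 2 ^ (n + 1 - 1 - 0) = 1 := by
      have : n + 1 - 1 - 0 = n := by omega
      rw [this, Nat.add_comm, Nat.add_div_right i (by positivity), Nat.div_eq_of_lt hi]
    rw [h0]
    decide
  · refine List.map_congr_left (fun j hj => ?_)
    have hj' : j < n := List.mem_range.mp hj
    have he : n - (j + 1) = n - 1 - j := by omega
    have hd := div_pow_mod_two n i (n - 1 - j) (by omega)
    simp [Function.comp, Nat.succ_eq_add_one, he, hd]

theorem range_map_split (n : Nat) :
    (List.range (2 ^ (n + 1))).map (gRow (n + 1)) =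
      ((List.range (2 ^ n)).map (gRow n)).map (fun r => 1 :: r) ++
      ((List.range (2 ^ n)).map (gRow n)).map (fun r => -1 :: r) := by
  have h2 : 2 ^ (n + 1) = 2 ^ n + 2 ^ n := by ring
  rw [h2, List.range_add, List.map_append, List.map_map, List.map_map, List.map_map]
  congr 1
  · exact List.map_congr_left (fun i hi => gRow_lo n i (List.mem_range.mp hi))
  · exact List.map_congr_left (fun i hi => gRow_hi n i (List.mem_range.mp hi))

theorem flatten_map_singleton {α β : Type} (f : α → β) (l : List α) :
    (l.map (fun x => [f x])).flatten = l.map f := by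
  induction l with
  | nil => rfl
  | cons x xs ih => simp [ih]

theorem fuel_eq_bits (k : Nat) : ∀ (m c : Int), m - c = (k : Int) + 1 →
    permuteSignFuel (k + 1) m c = (List.range (2 ^ (k + 1))).map (gRow (k + 1)) := by
  induction k with
  | zero =>
    intro m c h
    have hm : c + 1 = m := by omega
    simp [permuteSignFuel, hm]
    decide
  | succ k ih =>
    intro m c h
    have hne : ¬ (c + 1 = m) := by omega
    have hrec := ih m (c + 1) (by omega)
    simp only [permuteSignFuel, hne, if_false] at hrec ⊢
    rw [hrec]
    conv_rhs => rw [range_map_split]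
    simp [List.foldl]
    rw [← List.map_map, ← List.map_map, ← List.map_map, ← List.map_map,
      flatten_map_singleton, flatten_map_singleton]

-- ===== VERDICT (by name: the statement is the Claim_ definition above) =====
theorem permute_sign_spec : Claim_equal_permute_sign := by
  intro m c _ hpre
  unfold Spec_permute_sign permute_sign permute_sign_alt
  have hlt : c < m := hpre
  obtain ⟨k, hk⟩ : ∃ k : Nat, m - c = (k : Int) + 1 :=
    ⟨(m - c - 1).toNat, by omega⟩
  have h1 : (m - c).toNat = k + 1 := by omega
  simp only [h1]
  exact fuel_eq_bits k m c hk
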